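-- pv_equiv track=rewrite | github.com/GRID-INTELLIGENCE/GRID | src/grid/skills/transform_schema_map.py | _bucket_by_keywords
-- ===== SOURCE A (Python) =====
-- def _bucket_by_keywords(sentences: list[str], buckets: dict[str, list[str]]) -> tuple[dict[str, list[str]], list[str]]:
--     out: dict[str, list[str]] = {k: [] for k in buckets.keys()}
--     unmapped: list[str] = []
--
--     for s in sentences:
--         low = s.lower()
--         placed = False
--         for key, kws in buckets.items():
--             if any(kw in low for kw in kws):
--                 out[key].append(s)
--                 placed = True
--                 break
--         if not placed:
--             unmapped.append(s)
--
--     return out, unmapped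
-- ===== SOURCE B (Python) =====
-- def _bucket_by_keywords(sentences: list[str], buckets: dict[str, list[str]]) -> tuple[dict[str, list[str]], list[str]]:
--     # Staged pipeline instead of a mutate-as-you-go loop: (1) index every keyword
--     # once by the first bucket containing it, (2) label each sentence with the
--     # minimal matching bucket index (or None), (3) assemble the result by
--     # comprehensions over the labelled sentences.
--     keys = list(buckets.keys())
--     kw_first: dict[str, int] = {}
--     for i, kws in enumerate(buckets.values()):
--         for kw in kws:
--             kw_first.setdefault(kw, i)
--
--     def assign(s: str):
--         low = s.lower()
--         hits = [i for kw, i in kw_first.items() if kw in low]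
--         return min(hits) if hits else None
--
--     labels = [assign(s) for s in sentences]
--     out = {k: [s for s, l in zip(sentences, labels) if l == i] for i, k in enumerate(keys)}
--     unmapped = [s for s, l in zip(sentences, labels) if l is None]
--     return out, unmapped
-- ===== Notes on version B (the rewrite author's own statement) =====
-- stated objective: alternative
-- what changed: Replaces A's single pass that mutates the output dict with a break-on-first-match inner scan by a staged pipeline: a deduplicated keyword->first-bucket-index map built once, a labelling pass assigning each sentence the minimal matching bucket index, and per-bucket lists assembled afterwards by filtering the labelled sentences.
import Mathlib
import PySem

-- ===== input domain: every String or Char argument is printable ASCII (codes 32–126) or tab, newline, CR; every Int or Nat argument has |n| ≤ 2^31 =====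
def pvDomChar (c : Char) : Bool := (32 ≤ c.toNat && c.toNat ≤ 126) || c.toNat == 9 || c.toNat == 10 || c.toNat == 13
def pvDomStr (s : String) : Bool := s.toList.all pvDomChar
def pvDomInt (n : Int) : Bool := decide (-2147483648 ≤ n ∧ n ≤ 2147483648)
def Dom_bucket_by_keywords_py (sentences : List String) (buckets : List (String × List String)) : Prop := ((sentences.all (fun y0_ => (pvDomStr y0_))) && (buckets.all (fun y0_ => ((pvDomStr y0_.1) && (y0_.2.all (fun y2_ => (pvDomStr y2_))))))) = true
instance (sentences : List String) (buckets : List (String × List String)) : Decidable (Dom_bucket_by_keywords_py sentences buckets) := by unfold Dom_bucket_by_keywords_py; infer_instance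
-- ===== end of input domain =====

-- B replaces A's mutate-as-you-go loop by a staged pipeline: a keyword→first-bucket-index
-- map built once, a labelling pass giving each sentence its minimal matching bucket index,
-- and per-bucket lists assembled afterwards by filtering the labelled sentences
-- (objective: alternative decomposition, same exact value).

-- ===== PORT A =====
-- Literal port of A: per sentence, scan the buckets in order and place the sentence in
-- the first bucket one of whose keywords is a substring of the lowered sentence
-- (the inner 'for … if any(…): …; break' loop is List.find? over the dict's items).
def bucket_by_keywords_py (sentences : List String) (buckets : List (String × List String)) :
    (List (String × List String)) × List String :=
  let d := PySem.Dict.ofList buckets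
  let out0 : PySem.Dict String (List String) :=
    d.items.foldl (fun o kv => o.insert kv.1 ([] : List String)) PySem.Dict.empty
  let r := sentences.foldl
    (fun (acc : PySem.Dict String (List String) × List String) s =>
      let low := PySem.Str.lower s
      match d.items.find? (fun kv => kv.2.any (fun kw => PySem.Str.isIn kw low)) with
      | some kv => (acc.1.modify kv.1 [] (fun l => l ++ [s]), acc.2)
      | none => (acc.1, acc.2 ++ [s]))
    (out0, [])
  (r.1.items, r.2)

-- ===== PORT B =====
-- Literal port of B (Source B): kwFirst maps every keyword to the index of the first bucket
-- containing it ('enumerate' is ported as zipIdx, 'setdefault' as Dict.setdefault);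
-- 'assign' labels a sentence with the minimal matching bucket index (min of the hit
-- list, none when empty); the output lists are then comprehensions (filterMap) over
-- the sentences zipped with their labels.
def bucket_by_keywords_py_alt (sentences : List String) (buckets : List (String × List String)) :
    (List (String × List String)) × List String :=
  let d := PySem.Dict.ofList buckets
  let keys := d.keys
  let kwFirst : PySem.Dict String Nat :=
    (d.values.zipIdx).foldl
      (fun m p => p.1.foldl (fun m kw => m.setdefault kw p.2) m)
      PySem.Dict.empty
  let assign : String → Option Nat := fun s =>
    let low := PySem.Str.lower s
    let hits := kwFirst.items.filterMap
      (fun q => if PySem.Str.isIn q.1 low then some q.2 else none)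
    PySem.List.min? hits (fun i => i)
  let labels := sentences.map assign
  (keys.zipIdx.map (fun p =>
      (p.1, (sentences.zip labels).filterMap
        (fun q => if q.2 == some p.2 then some q.1 else none))),
   (sentences.zip labels).filterMap (fun q => if q.2 == none then some q.1 else none))

-- ===== PRECONDITION & SPEC =====
def Spec_bucket_by_keywords_py (sentences : List String) (buckets : List (String × List String)) (out : (List (String × List String)) × List String) : Prop := out = bucket_by_keywords_py_alt sentences buckets
instance (sentences : List String) (buckets : List (String × List String)) (out : (List (String × List String)) × List String) : Decidable (Spec_bucket_by_keywords_py sentences buckets out) := by unfold Spec_bucket_by_keywords_py; infer_instance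

-- ===== CLAIM (what is proved, stated in full; the proofs are below) =====
def Claim_equal_bucket_by_keywords_py : Prop := ∀ (sentences : List String) (buckets : List (String × List String)), Dom_bucket_by_keywords_py sentences buckets → Spec_bucket_by_keywords_py sentences buckets (bucket_by_keywords_py sentences buckets)

-- ===== LEMMAS AND PROOFS =====

-- A's per-bucket test: some keyword of the bucket is a substring of `low`.
def pvMatch (low : String) (kv : String × List String) : Bool :=
  kv.2.any (fun kw => PySem.Str.isIn kw low)

-- The sentence labelling both sides compute: index of the first matching bucket.
def pvAssign (bs : List (String × List String)) (s : String) : Option Nat :=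
  bs.findIdx? (pvMatch (PySem.Str.lower s))

-- B's keyword index, as a function of the buckets' keyword lists.
def pvKwFirst (vals : List (List String)) : PySem.Dict String Nat :=
  (vals.zipIdx).foldl
    (fun m p => p.1.foldl (fun m kw => m.setdefault kw p.2) m)
    PySem.Dict.empty

-- B's matching bucket indices for one lowered sentence.
def pvHits (vals : List (List String)) (low : String) : List Nat :=
  (pvKwFirst vals).items.filterMap
    (fun q => if PySem.Str.isIn q.1 low then some q.2 else none)

lemma pv_setdefault_eq {κ ν : Type} [BEq κ] [LawfulBEq κ] (d : PySem.Dict κ ν) (k : κ) (v : ν) :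
    d.setdefault k v = if d.contains k then d else d.insert k v := by
  by_cases hc : d.contains k <;> simp [PySem.Dict.setdefault, PySem.Dict.insert, hc]

lemma pv_inner_get? (kws : List String) (i : Nat) (m : PySem.Dict String Nat) (kw : String) :
    (kws.foldl (fun m kw => m.setdefault kw i) m).get? kw
      = (m.get? kw).or (if kw ∈ kws then some i else none) := by
  induction kws generalizing m with
  | nil => simp
  | cons h t ih =>
    rw [List.foldl_cons, ih, pv_setdefault_eq]
    by_cases hc : m.contains h
    · simp only [hc, if_true]
      by_cases hkw : kw = h
      · subst hkw
        rcases ho : m.get? kw with _ | v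
        · rw [PySem.Dict.get?_eq_none_iff_contains] at ho; rw [hc] at ho; cases ho
        · simp
      · simp [List.mem_cons, hkw]
    · simp only [hc, Bool.false_eq_true, if_false]
      by_cases hkw : kw = h
      · subst hkw
        have hnone : m.get? kw = none := by
          rw [PySem.Dict.get?_eq_none_iff_contains]; simpa using hc
        rw [PySem.Dict.get?_insert_self, hnone]
        simp
      · rw [PySem.Dict.get?_insert_of_ne _ _ hkw]
        simp [List.mem_cons, hkw]

lemma pv_inner_nodup (kws : List String) (i : Nat) (m : PySem.Dict String Nat)
    (h : m.keys.Nodup) :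
    (kws.foldl (fun m kw => m.setdefault kw i) m).keys.Nodup := by
  induction kws generalizing m with
  | nil => simpa
  | cons x t ih =>
    rw [List.foldl_cons, pv_setdefault_eq]
    apply ih
    by_cases hc : m.contains x
    · simpa [hc]
    · simpa [hc] using PySem.Dict.nodup_keys_insert m x i h

lemma pv_outer_get? (vals : List (List String)) (n : Nat) (m : PySem.Dict String Nat) (kw : String) :
    ((vals.zipIdx n).foldl
      (fun m p => p.1.foldl (fun m kw => m.setdefault kw p.2) m) m).get? kw
      = (m.get? kw).or ((vals.findIdx? (fun l => decide (kw ∈ l))).map (· + n)) := by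
  induction vals generalizing n m with
  | nil => simp
  | cons x t ih =>
    rw [List.zipIdx_cons, List.foldl_cons, ih, pv_inner_get?, Option.or_assoc,
      List.findIdx?_cons]
    by_cases hx : kw ∈ x
    · simp [hx]
    · simp only [hx, decide_false, Bool.false_eq_true, if_false, Option.map_map,
        Option.none_or]
      have hfun : (fun x => x + (n + 1)) = ((fun x => x + n) ∘ fun i => i + 1) := by
        funext j; show j + (n + 1) = j + 1 + n; omega
      rw [hfun]

lemma pv_kwFirst_get? (vals : List (List String)) (kw : String) :
    (pvKwFirst vals).get? kw = vals.findIdx? (fun l => decide (kw ∈ l)) := by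
  have := pv_outer_get? vals 0 PySem.Dict.empty kw
  simpa [pvKwFirst] using this

lemma pv_outer_nodup (ps : List (List String × Nat)) (m : PySem.Dict String Nat)
    (h : m.keys.Nodup) :
    (ps.foldl
      (fun m p => p.1.foldl (fun m kw => m.setdefault kw p.2) m)
      m).keys.Nodup := by
  induction ps generalizing m with
  | nil => simpa
  | cons p t ih =>
    simp only [List.foldl_cons]
    exact ih _ (pv_inner_nodup p.1 p.2 m h)

lemma pv_kwFirst_nodup (vals : List (List String)) : (pvKwFirst vals).keys.Nodup := by
  unfold pvKwFirst
  exact pv_outer_nodup _ _ (by simp [PySem.Dict.empty, PySem.Dict.keys])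

lemma pv_min?_go_mem {α κ : Type} [LinearOrder κ] (xs : List α) (key : α → κ) (a : α) (m : α)
    (h : xs.foldl (fun acc x => match acc with
      | none => some x
      | some m => if key x < key m then some x else some m) (some a) = some m) :
    m = a ∨ m ∈ xs := by
  induction xs generalizing a with
  | nil => simp at h; exact Or.inl h.symm
  | cons x t ih =>
    simp only [List.foldl_cons] at h
    by_cases hlt : key x < key a
    · rw [if_pos hlt] at h
      rcases ih x h with h1 | h1
      · exact Or.inr (by simp [h1])
      · exact Or.inr (List.mem_cons_of_mem _ h1)
    · rw [if_neg hlt] at h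
      rcases ih a h with h1 | h1
      · exact Or.inl h1
      · exact Or.inr (List.mem_cons_of_mem _ h1)

lemma pv_min?_mem {α κ : Type} [LinearOrder κ] (xs : List α) (key : α → κ) (m : α)
    (h : PySem.List.min? xs key = some m) : m ∈ xs := by
  unfold PySem.List.min? at h
  cases xs with
  | nil => simp at h
  | cons x t =>
    simp only [List.foldl_cons] at h
    rcases pv_min?_go_mem t key x m h with h1 | h1
    · simp [h1]
    · exact List.mem_cons_of_mem _ h1

lemma pv_min?_eq_none {α κ : Type} [LinearOrder κ] (xs : List α) (key : α → κ) :
    PySem.List.min? xs key = none ↔ xs = [] := by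
  constructor
  · intro h
    cases xs with
    | nil => rfl
    | cons x t =>
      exfalso
      unfold PySem.List.min? at h
      simp only [List.foldl_cons] at h
      have : ∀ (t : List α) (a : α), t.foldl (fun acc x => match acc with
          | none => some x
          | some m => if key x < key m then some x else some m) (some a) ≠ none := by
        intro t
        induction t with
        | nil => simp
        | cons y u ih => intro a; simp only [List.foldl_cons]; split <;> apply ih
      exact this t x h
  · rintro rfl; rfl

lemma pv_mem_items_iff_get? {κ ν : Type} [BEq κ] [LawfulBEq κ] (d : PySem.Dict κ ν)
    (h : d.keys.Nodup) (k : κ) (v : ν) : (k, v) ∈ d.items ↔ d.get? k = some v := by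
  constructor
  · intro hm; exact PySem.Dict.get?_of_mem_items d hm h
  · intro hg
    unfold PySem.Dict.get? at hg
    rcases hf : List.find? (fun p => p.1 == k) d.items with _ | p
    · rw [hf] at hg; cases hg
    · rw [hf] at hg
      have hp1 : p.1 = k := by
        have := List.find?_some hf
        simpa using this
      have hmem := List.mem_of_find?_eq_some hf
      have : p = (k, v) := by
        cases p; simp at hg hp1 ⊢; exact ⟨hp1, hg⟩
      rwa [this] at hmem

lemma pv_mem_hits (vals : List (List String)) (low : String) (i : Nat) :
    i ∈ pvHits vals low ↔
      ∃ kw, PySem.Str.isIn kw low = true ∧ vals.findIdx? (fun l => decide (kw ∈ l)) = some i := by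
  unfold pvHits
  rw [List.mem_filterMap]
  constructor
  · rintro ⟨⟨kw, j⟩, hmem, hq⟩
    by_cases hin : PySem.Str.isIn kw low
    · rw [if_pos hin] at hq
      obtain rfl : j = i := Option.some.inj hq
      refine ⟨kw, hin, ?_⟩
      rw [← pv_kwFirst_get?]
      exact (pv_mem_items_iff_get? _ (pv_kwFirst_nodup vals) kw j).1 hmem
    · rw [if_neg hin] at hq; cases hq
  · rintro ⟨kw, hin, hidx⟩
    refine ⟨(kw, i), ?_, by rw [if_pos hin]⟩
    rw [pv_mem_items_iff_get? _ (pv_kwFirst_nodup vals) kw i, pv_kwFirst_get?]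
    exact hidx

lemma pv_min_hits (bs : List (String × List String)) (low : String) :
    PySem.List.min? (pvHits (bs.map Prod.snd) low) (fun i => i)
      = bs.findIdx? (pvMatch low) := by
  rcases hA : bs.findIdx? (pvMatch low) with _ | m
  · rw [List.findIdx?_eq_none_iff] at hA
    have hnil : pvHits (bs.map Prod.snd) low = [] := by
      by_contra hne
      rcases List.exists_mem_of_ne_nil _ hne with ⟨i, hi⟩
      rw [pv_mem_hits] at hi
      rcases hi with ⟨kw, hin, hidx⟩
      rw [List.findIdx?_eq_some_iff_getElem] at hidx
      rcases hidx with ⟨hlt, hmem, -⟩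
      have hblt : i < bs.length := by simpa using hlt
      have hmem' : kw ∈ bs[i].2 := by
        have h2 : (List.map Prod.snd bs)[i] = bs[i].2 := List.getElem_map _
        rw [h2] at hmem; simpa using hmem
      have := hA bs[i] (List.getElem_mem hblt)
      unfold pvMatch at this
      rw [List.any_eq_false] at this
      exact this kw hmem' hin
    rw [hnil]; rfl
  · rw [List.findIdx?_eq_some_iff_getElem] at hA
    rcases hA with ⟨hm, hPm, hmin⟩
    have hub : ∀ i ∈ pvHits (bs.map Prod.snd) low, m ≤ i := by
      intro i hi
      rw [pv_mem_hits] at hi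
      rcases hi with ⟨kw, hin, hidx⟩
      rw [List.findIdx?_eq_some_iff_getElem] at hidx
      rcases hidx with ⟨hlt, hmemi, -⟩
      by_contra hlt'
      rw [Nat.not_le] at hlt'
      have hblt : i < bs.length := by simpa using hlt
      have hmemi' : kw ∈ bs[i].2 := by
        have h2 : (List.map Prod.snd bs)[i] = bs[i].2 := List.getElem_map _
        rw [h2] at hmemi; simpa using hmemi
      refine hmin i hlt' ?_
      unfold pvMatch
      rw [List.any_eq_true]
      exact ⟨kw, hmemi', hin⟩
    have hmem : m ∈ pvHits (bs.map Prod.snd) low := by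
      unfold pvMatch at hPm
      rw [List.any_eq_true] at hPm
      rcases hPm with ⟨kw, hkwmem, hin⟩
      have hsome : ∃ j, (bs.map Prod.snd).findIdx? (fun l => decide (kw ∈ l)) = some j := by
        rw [← Option.isSome_iff_exists, List.findIdx?_isSome, List.any_eq_true]
        refine ⟨bs[m].2, ?_, by simpa using hkwmem⟩
        rw [List.mem_map]
        exact ⟨bs[m], List.getElem_mem hm, rfl⟩
      rcases hsome with ⟨j, hj⟩
      have hjm : j ≤ m := by
        rw [List.findIdx?_eq_some_iff_getElem] at hj
        rcases hj with ⟨hjlt, -, hjmin⟩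
        by_contra hgt
        rw [Nat.not_le] at hgt
        refine hjmin m hgt ?_
        have h2 : (List.map Prod.snd bs)[m]'(by simpa using hm) = bs[m].2 := List.getElem_map _
        rw [h2]
        simpa using hkwmem
      have hjhit : j ∈ pvHits (bs.map Prod.snd) low := by
        rw [pv_mem_hits]; exact ⟨kw, hin, hj⟩
      have := hub j hjhit
      have : j = m := le_antisymm hjm this
      rwa [this] at hjhit
    rcases hmq : PySem.List.min? (pvHits (bs.map Prod.snd) low) (fun i => i) with _ | v
    · rw [pv_min?_eq_none] at hmq
      rw [hmq] at hmem; cases hmem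
    · have hv1 : v ∈ pvHits (bs.map Prod.snd) low := pv_min?_mem _ _ _ hmq
      have hv2 : v ≤ m := PySem.List.min?_isMin hmq m hmem
      have hv3 : m ≤ v := hub v hv1
      rw [le_antisymm hv2 hv3]

lemma pv_out0_items (bs : List (String × List String)) (d : PySem.Dict String (List String))
    (h : (d.keys ++ bs.map Prod.fst).Nodup) :
    (bs.foldl (fun o kv => o.insert kv.1 ([] : List String)) d).items
      = d.items ++ bs.map (fun kv => (kv.1, ([] : List String))) := by
  induction bs generalizing d with
  | nil => simp
  | cons kv t ih =>
    simp only [List.foldl_cons]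
    have hnc : d.contains kv.1 = false := by
      rw [← Bool.not_eq_true, PySem.Dict.contains_iff_mem_keys]
      intro hmem
      rcases List.nodup_append.1 h with ⟨-, -, hdisj⟩
      exact hdisj _ hmem _ (by simp) rfl
    have hitems : (d.insert kv.1 ([] : List String)).items = d.items ++ [(kv.1, [])] := by
      simp [PySem.Dict.insert, hnc]
    rw [ih, hitems]
    · simp
    · have hkeys : (d.insert kv.1 ([] : List String)).keys = d.keys ++ [kv.1] :=
        PySem.Dict.keys_insert_of_not_contains d _ hnc
      rw [hkeys]
      simpa using h

lemma pv_zip_find? (keys : List String) (g : List (List String)) (m : Nat)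
    (hnd : keys.Nodup) (hm : m < keys.length) (hg : g.length = keys.length) :
    List.find? (fun p => p.1 == keys[m]) (keys.zip g) = some (keys[m], g[m]'(by omega)) := by
  rw [List.find?_eq_some_iff_getElem]
  refine ⟨by simp, m, by simp [List.length_zip]; omega, ?_, ?_⟩
  · rw [List.getElem_zip]
  · intro j hj
    have hjlt : j < keys.length := by omega
    have hjg : j < g.length := by omega
    have hzz : (keys.zip g)[j]'(by simp [List.length_zip]; omega) = (keys[j], g[j]'hjg) :=
      List.getElem_zip
    rw [hzz]
    simp only [Bool.not_eq_true', beq_eq_false_iff_ne, ne_eq]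
    intro heq
    exact absurd ((List.Nodup.getElem_inj_iff hnd).1 heq) (by omega)

lemma pv_modify_step (keys : List String) (g : List (List String)) (m : Nat) (s : String)
    (d : PySem.Dict String (List String)) (hd : d.items = keys.zip g)
    (hnd : keys.Nodup) (hm : m < keys.length) (hg : g.length = keys.length) :
    (d.modify keys[m] [] (fun l => l ++ [s])).items
      = keys.zip (g.set m (g.getD m [] ++ [s])) := by
  have hmg : m < g.length := by omega
  have hfind := pv_zip_find? keys g m hnd hm hg
  have hget : d.get? keys[m] = some (g[m]'hmg) := by
    unfold PySem.Dict.get?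
    rw [hd, hfind]
    rfl
  have hcont : d.contains keys[m] = true := by
    by_contra hc
    have hc' : d.contains keys[m] = false := by simpa using hc
    rw [← PySem.Dict.get?_eq_none_iff_contains] at hc'
    rw [hc'] at hget
    cases hget
  have hgetD : d.getD keys[m] [] = g[m]'hmg := by
    unfold PySem.Dict.getD; rw [hget]; rfl
  unfold PySem.Dict.modify
  rw [hgetD]
  have hitems : (d.insert keys[m] (g[m]'hmg ++ [s])).items
      = d.items.map (fun p => if p.1 == keys[m] then (keys[m], g[m]'hmg ++ [s]) else p) := by
    simp [PySem.Dict.insert, hcont]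
  rw [hitems, hd]
  have hset : g.getD m [] = g[m]'hmg := by
    simp [List.getD_eq_getElem?_getD, List.getElem?_eq_getElem hmg]
  rw [hset]
  apply List.ext_getElem
  · simp only [List.length_map, List.length_zip, List.length_set]
  · intro j hj1 hj2
    have hjk : j < keys.length := by simp [List.length_zip] at hj1; omega
    have hjg : j < g.length := by omega
    have hz : (keys.zip g)[j]'(by simp [List.length_zip]; omega) = (keys[j], g[j]'hjg) :=
      List.getElem_zip
    rw [List.getElem_map, hz]
    have hz2 : (keys.zip (g.set m (g[m]'hmg ++ [s])))[j]'(by simp [List.length_zip]; omega)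
        = (keys[j], (g.set m (g[m]'hmg ++ [s]))[j]'(by simp; omega)) := List.getElem_zip
    rw [hz2]
    by_cases hjm : j = m
    · subst hjm
      simp
    · have hne : (keys[j] == keys[m]) = false := by
        simp only [beq_eq_false_iff_ne, ne_eq]
        intro heq
        exact hjm ((List.Nodup.getElem_inj_iff hnd).1 heq)
      rw [hne]
      simp only [Bool.false_eq_true, if_false, List.getElem_set]
      rw [if_neg (fun h => hjm h.symm)]

lemma pv_find?_findIdx? (bs : List (String × List String)) (p : String × List String → Bool)
    (kv : String × List String) (h : bs.find? p = some kv) :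
    ∃ m, List.findIdx? p bs = some m ∧ ∃ (hm : m < bs.length), bs[m] = kv := by
  rw [List.find?_eq_some_iff_getElem] at h
  rcases h with ⟨hp, i, hi, heq, hmin⟩
  refine ⟨i, ?_, hi, heq⟩
  rw [List.findIdx?_eq_some_iff_getElem]
  exact ⟨hi, by rw [heq]; exact hp, fun j hj => by simpa using hmin j hj⟩

-- Zipping a list with its own map and filtering on the label is filtering on the function.
lemma pv_filterMap_zip_map (f : String → Option Nat) (p : Option Nat → Bool) (xs : List String) :
    (xs.zip (xs.map f)).filterMap (fun q => if p q.2 then some q.1 else none)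
      = xs.filter (fun s => p (f s)) := by
  induction xs with
  | nil => rfl
  | cons x t ih =>
    simp only [List.map_cons, List.zip_cons_cons, List.filterMap_cons, List.filter_cons]
    by_cases hp : p (f x)
    · simp only [hp, if_true, ih]
    · simp only [hp, Bool.false_eq_true, if_false, ih]

-- A's sentence loop, characterised pointwise by pvAssign: starting from groups g and
-- unmapped u, each bucket i ends with g[i] ++ the sentences labelled i, and the
-- unmapped list ends with u ++ the sentences labelled none.
lemma pv_Aloop (bs : List (String × List String)) (hnd : (bs.map Prod.fst).Nodup)
    (sentences : List String) (o : PySem.Dict String (List String))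
    (g : List (List String)) (u : List String)
    (ho : o.items = (bs.map Prod.fst).zip g) (hg : g.length = bs.length) :
    ∃ g', (sentences.foldl
      (fun (acc : PySem.Dict String (List String) × List String) s =>
        let low := PySem.Str.lower s
        match bs.find? (fun kv => kv.2.any (fun kw => PySem.Str.isIn kw low)) with
        | some kv => (acc.1.modify kv.1 [] (fun l => l ++ [s]), acc.2)
        | none => (acc.1, acc.2 ++ [s]))
      (o, u)).1.items = (bs.map Prod.fst).zip g'
    ∧ g'.length = bs.length
    ∧ (∀ i (h1 : i < g'.length) (h2 : i < g.length),
        g'[i]'h1 = g[i]'h2 ++ sentences.filter (fun s => pvAssign bs s == some i))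
    ∧ (sentences.foldl
      (fun (acc : PySem.Dict String (List String) × List String) s =>
        let low := PySem.Str.lower s
        match bs.find? (fun kv => kv.2.any (fun kw => PySem.Str.isIn kw low)) with
        | some kv => (acc.1.modify kv.1 [] (fun l => l ++ [s]), acc.2)
        | none => (acc.1, acc.2 ++ [s]))
      (o, u)).2 = u ++ sentences.filter (fun s => pvAssign bs s == none) := by
  induction sentences generalizing o g u with
  | nil =>
    exact ⟨g, ho, by omega, fun i h1 h2 => by simp, by simp⟩
  | cons s t ih =>
    simp only [List.foldl_cons]
    rcases hf : bs.find? (fun kv => kv.2.any (fun kw => PySem.Str.isIn kw (PySem.Str.lower s))) with _ | kv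
    · have hidx : pvAssign bs s = none := by
        unfold pvAssign
        rw [List.findIdx?_eq_none_iff]
        intro x hx
        have := List.find?_eq_none.1 hf x hx
        simpa [pvMatch] using this
      simp only [hf]
      rcases ih o g (u ++ [s]) ho hg with ⟨g', h1, h2, h3, h4⟩
      refine ⟨g', h1, h2, fun i hi1 hi2 => ?_, ?_⟩
      · rw [h3 i hi1 hi2, List.filter_cons]
        simp [hidx]
      · rw [h4, List.filter_cons]
        simp [hidx]
    · rcases pv_find?_findIdx? bs _ kv hf with ⟨m, hidxm, hm, hbm⟩
      have hidx : pvAssign bs s = some m := by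
        unfold pvAssign
        unfold pvMatch
        exact hidxm
      simp only [hf]
      have hkm : m < (bs.map Prod.fst).length := by simpa using hm
      have hkeq : kv.1 = (bs.map Prod.fst)[m] := by
        rw [List.getElem_map _]; rw [hbm]
      have hstep := pv_modify_step (bs.map Prod.fst) g m s o ho hnd hkm (by simpa using hg)
      rw [← hkeq] at hstep
      have hmg : m < g.length := by omega
      rcases ih _ _ u hstep (by simpa using hg) with ⟨g', h1, h2, h3, h4⟩
      refine ⟨g', h1, h2, fun i hi1 hi2 => ?_, ?_⟩
      · have hi2' : i < (g.set m (g.getD m [] ++ [s])).length := by simpa using hi2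
        rw [h3 i hi1 hi2', List.filter_cons]
        by_cases him : i = m
        · subst him
          have hgset : (g.set i (g.getD i [] ++ [s]))[i]'hi2' = g[i]'hi2 ++ [s] := by
            simp [List.getD_eq_getElem?_getD, List.getElem?_eq_getElem hi2]
          rw [hgset]
          simp [hidx]
        · have hgset : (g.set m (g.getD m [] ++ [s]))[i]'hi2' = g[i]'hi2 := by
            rw [List.getElem_set]; exact if_neg (fun h => him h.symm)
          rw [hgset]
          have : (pvAssign bs s == some i) = false := by
            rw [hidx]; simpa using fun h => him h.symm
          simp [this]
      · rw [h4, List.filter_cons]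
        have : (pvAssign bs s == none) = false := by rw [hidx]; simp
        simp [this]

lemma pv_zip_init (bs : List (String × List String)) :
    bs.map (fun kv => (kv.1, ([] : List String)))
      = (bs.map Prod.fst).zip ((bs.map Prod.fst).map (fun _ => ([] : List String))) := by
  induction bs with
  | nil => rfl
  | cons kv t ih => simp [ih]

-- The common closed form both ports reach: per bucket index i the sentences labelled i,
-- plus the sentences labelled none.
def pvOut (sentences : List String) (bs : List (String × List String)) :
    (List (String × List String)) × List String :=
  ((bs.map Prod.fst).zipIdx.map
    (fun p => (p.1, sentences.filter (fun s => pvAssign bs s == some p.2))),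
   sentences.filter (fun s => pvAssign bs s == none))

lemma pv_A_eq (sentences : List String) (buckets : List (String × List String)) :
    bucket_by_keywords_py sentences buckets
      = pvOut sentences (PySem.Dict.ofList buckets).items := by
  have hnd : (((PySem.Dict.ofList buckets).items).map Prod.fst).Nodup :=
    PySem.Dict.nodup_keys_ofList buckets
  have hinit : ((((PySem.Dict.ofList buckets).items).foldl
        (fun o kv => o.insert kv.1 ([] : List String)) PySem.Dict.empty)).items
      = (((PySem.Dict.ofList buckets).items).map Prod.fst).zip
        ((((PySem.Dict.ofList buckets).items).map Prod.fst).map (fun _ => ([] : List String))) := by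
    rw [pv_out0_items ((PySem.Dict.ofList buckets).items) PySem.Dict.empty (by simpa using hnd),
      pv_zip_init]
    rfl
  rcases pv_Aloop ((PySem.Dict.ofList buckets).items) hnd sentences _ _ [] hinit (by simp)
    with ⟨g', h1, h2, h3, h4⟩
  have hA : bucket_by_keywords_py sentences buckets
      = ((sentences.foldl
          (fun (acc : PySem.Dict String (List String) × List String) s =>
            let low := PySem.Str.lower s
            match ((PySem.Dict.ofList buckets).items).find?
                (fun kv => kv.2.any (fun kw => PySem.Str.isIn kw low)) with
            | some kv => (acc.1.modify kv.1 [] (fun l => l ++ [s]), acc.2)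
            | none => (acc.1, acc.2 ++ [s]))
          ((((PySem.Dict.ofList buckets).items).foldl
            (fun o kv => o.insert kv.1 ([] : List String)) PySem.Dict.empty), [])).1.items,
         (sentences.foldl
          (fun (acc : PySem.Dict String (List String) × List String) s =>
            let low := PySem.Str.lower s
            match ((PySem.Dict.ofList buckets).items).find?
                (fun kv => kv.2.any (fun kw => PySem.Str.isIn kw low)) with
            | some kv => (acc.1.modify kv.1 [] (fun l => l ++ [s]), acc.2)
            | none => (acc.1, acc.2 ++ [s]))
          ((((PySem.Dict.ofList buckets).items).foldl
            (fun o kv => o.insert kv.1 ([] : List String)) PySem.Dict.empty), [])).2) := rfl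
  rw [hA, h1, h4]
  unfold pvOut
  rw [Prod.mk.injEq]
  refine ⟨?_, by simp⟩
  apply List.ext_getElem
  · simp [List.length_zip, h2]
  · intro i hi1 hi2
    have hik : i < (((PySem.Dict.ofList buckets).items).map Prod.fst).length := by
      simpa using hi2
    have hig : i < g'.length := by
      rw [h2]; simpa using hik
    simp only [List.getElem_zip, List.getElem_map, List.getElem_zipIdx]
    refine Prod.ext rfl ?_
    show g'[i]'hig = _
    rw [h3 i hig (by simpa using hik)]
    simp

lemma pv_B_eq (sentences : List String) (buckets : List (String × List String)) :
    bucket_by_keywords_py_alt sentences buckets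
      = pvOut sentences (PySem.Dict.ofList buckets).items := by
  have hassign : ∀ s : String,
      PySem.List.min? ((pvKwFirst (((PySem.Dict.ofList buckets).items).map Prod.snd)).items.filterMap
        (fun q => if PySem.Str.isIn q.1 (PySem.Str.lower s) then some q.2 else none)) (fun i => i)
      = pvAssign ((PySem.Dict.ofList buckets).items) s := by
    intro s
    have := pv_min_hits ((PySem.Dict.ofList buckets).items) (PySem.Str.lower s)
    unfold pvHits at this
    exact this
  have hB : bucket_by_keywords_py_alt sentences buckets
      = ((((PySem.Dict.ofList buckets).items.map Prod.fst).zipIdx.map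
          (fun p => (p.1, (sentences.zip (sentences.map (fun s =>
            PySem.List.min? ((pvKwFirst (((PySem.Dict.ofList buckets).items).map Prod.snd)).items.filterMap
              (fun q => if PySem.Str.isIn q.1 (PySem.Str.lower s) then some q.2 else none))
              (fun i => i)))).filterMap
            (fun q => if q.2 == some p.2 then some q.1 else none)))),
         (sentences.zip (sentences.map (fun s =>
            PySem.List.min? ((pvKwFirst (((PySem.Dict.ofList buckets).items).map Prod.snd)).items.filterMap
              (fun q => if PySem.Str.isIn q.1 (PySem.Str.lower s) then some q.2 else none))
              (fun i => i)))).filterMap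
            (fun q => if q.2 == none then some q.1 else none)) := rfl
  rw [hB]
  unfold pvOut
  rw [Prod.mk.injEq]
  constructor
  · refine List.map_congr_left (fun p _ => ?_)
    refine Prod.ext rfl ?_
    show (sentences.zip (sentences.map _)).filterMap _ = _
    rw [pv_filterMap_zip_map _ (fun l => l == some p.2) sentences]
    simp only [hassign]
  · rw [pv_filterMap_zip_map _ (fun l => l == none) sentences]
    simp only [hassign]

-- ===== VERDICT (by name: the statement is the Claim_ definition above) =====
theorem bucket_by_keywords_py_spec : Claim_equal_bucket_by_keywords_py := by
  intro sentences buckets _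
  unfold Spec_bucket_by_keywords_py
  rw [pv_A_eq, pv_B_eq]
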